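-- pv_equiv track=rewrite | github.com/supitchaya1/Project_Sign_Language | backend/main.py | reorder_by_rule
-- ===== SOURCE A (Python) =====
-- from typing import Dict, Any, Optional, List, Tuple
--
-- def reorder_by_rule(tagged: List[Dict[str, Any]], thsl_order: List[str]) -> List[Dict[str, Any]]:
--     used = set()
--     out: List[Dict[str, Any]] = []
--
--     def compatible(wanted: str, actual: str) -> bool:
--         if wanted == "Age/Year":
--             return actual in {"Age", "Year"}
--         if wanted == "S":
--             return actual in {"S", "Pronoun"}
--         if wanted == "Adj":
--             return actual in {"Adj", "Adj1", "Adj2"}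
--         return wanted == actual
--
--     for wanted_role in thsl_order:
--         idx = next(
--             (
--                 i for i, item in enumerate(tagged)
--                 if i not in used and compatible(wanted_role, item.get("role", ""))
--             ),
--             -1
--         )
--         if idx >= 0:
--             out.append(tagged[idx])
--             used.add(idx)
--
--     for i, item in enumerate(tagged):
--         if i not in used:
--             out.append(item)
--
--     return out
-- ===== SOURCE B (Python) =====
-- from typing import Dict, Any, List
-- from collections import deque
--
-- _COMPAT = {
--     "Age/Year": ["Age", "Year"],
--     "S": ["S", "Pronoun"],
--     "Adj": ["Adj", "Adj1", "Adj2"],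
-- }
--
--
-- def reorder_by_rule(tagged: List[Dict[str, Any]], thsl_order: List[str]) -> List[Dict[str, Any]]:
--     # Index items once into per-role FIFO queues of indices; each wanted role
--     # pops the smallest front among its (<= 3) compatible buckets: O(n + m).
--     buckets: Dict[str, deque] = {}
--     for i, item in enumerate(tagged):
--         buckets.setdefault(item.get("role", ""), deque()).append(i)
--
--     used = [False] * len(tagged)
--     out: List[Dict[str, Any]] = []
--     for wanted in thsl_order:
--         best = None  # (index, role) with the smallest index among compatible fronts
--         for r in _COMPAT.get(wanted, [wanted]):
--             q = buckets.get(r)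
--             if q and (best is None or q[0] < best[0]):
--                 best = (q[0], r)
--         if best is not None:
--             i, r = best
--             buckets[r].popleft()
--             used[i] = True
--             out.append(tagged[i])
--
--     out.extend(item for i, item in enumerate(tagged) if not used[i])
--     return out
-- ===== Notes on version B (the rewrite author's own statement) =====
-- stated objective: faster
-- what changed: Instead of rescanning the whole tagged list for each wanted role (with a growing used-index set), B indexes the items once into per-role FIFO queues of indices and serves each wanted role by popping the smallest front among its at-most-three compatible queues, keeping a bool array for the leftover pass.
import Mathlib
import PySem

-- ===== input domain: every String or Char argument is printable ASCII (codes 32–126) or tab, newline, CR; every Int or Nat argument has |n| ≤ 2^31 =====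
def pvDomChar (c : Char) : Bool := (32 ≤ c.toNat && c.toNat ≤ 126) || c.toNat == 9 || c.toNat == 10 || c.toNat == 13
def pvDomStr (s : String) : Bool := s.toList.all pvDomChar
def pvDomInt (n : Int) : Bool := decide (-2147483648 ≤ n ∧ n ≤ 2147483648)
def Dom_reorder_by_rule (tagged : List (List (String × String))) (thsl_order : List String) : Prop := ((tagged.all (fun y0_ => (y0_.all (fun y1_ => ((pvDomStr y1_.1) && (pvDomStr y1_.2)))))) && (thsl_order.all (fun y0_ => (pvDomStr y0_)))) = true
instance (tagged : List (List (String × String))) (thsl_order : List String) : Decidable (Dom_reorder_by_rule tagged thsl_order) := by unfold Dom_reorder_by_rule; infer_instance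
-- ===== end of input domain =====

-- B replaces A's per-role rescans of the whole list (O(n*m)) by per-role index queues built
-- once, popping the smallest front among the (≤ 3) compatible buckets per wanted role (O(n+m)).

-- ===== PORT A =====
-- item.get("role", "")
def pvRole (item : List (String × String)) : String := PySem.Dict.getD ⟨item⟩ "role" ""

def pvCompat (wanted actual : String) : Bool :=
  if wanted = "Age/Year" then decide (actual = "Age" ∨ actual = "Year")
  else if wanted = "S" then decide (actual = "S" ∨ actual = "Pronoun")
  else if wanted = "Adj" then decide (actual = "Adj" ∨ actual = "Adj1" ∨ actual = "Adj2")
  else decide (wanted = actual)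

-- next((i for i, item in enumerate(tagged) if i not in used and compatible(...)), -1)
def pvFindA (used : PySem.Set Int) (w : String) (i : Int) :
    List (List (String × String)) → Int
  | [] => -1
  | item :: rest =>
    if decide (i ∉ used) && pvCompat w (pvRole item) then i
    else pvFindA used w (i + 1) rest

-- the body of A's 'for wanted_role in thsl_order' loop
def pvStepA (tagged : List (List (String × String)))
    (st : PySem.Set Int × List (List (String × String))) (wanted_role : String) :
    PySem.Set Int × List (List (String × String)) :=
  let idx := pvFindA st.1 wanted_role 0 tagged
  if 0 ≤ idx then
    -- out.append(tagged[idx]); idx is an index enumerate produced, so pyGet? is some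
    (PySem.Set.add st.1 idx, st.2 ++ (PySem.List.pyGet? tagged idx).toList)
  else st

def reorder_by_rule (tagged : List (List (String × String))) (thsl_order : List String) :
    List (List (String × String)) :=
  let fin := thsl_order.foldl (pvStepA tagged) (PySem.Set.empty, [])
  (PySem.List.enumerate tagged 0).foldl
    (fun out p => if decide (p.1 ∉ fin.1) then out ++ [p.2] else out) fin.2

-- ===== PORT B =====
def pvCOMPAT : PySem.Dict String (List String) :=
  PySem.Dict.ofList
    [("Age/Year", ["Age", "Year"]), ("S", ["S", "Pronoun"]), ("Adj", ["Adj", "Adj1", "Adj2"])]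

-- the inner 'for r in _COMPAT.get(wanted, [wanted])' loop choosing the smallest front
def pvBest (buckets : PySem.Dict String (List Int)) (roles : List String) :
    Option (Int × String) :=
  roles.foldl
    (fun best r =>
      match buckets.get? r with
      | none => best            -- r not a key
      | some [] => best         -- empty deque is falsy
      | some (x :: _) =>
        match best with
        | none => some (x, r)
        | some b => if x < b.1 then some (x, r) else best)
    none

-- the body of B's 'for wanted in thsl_order' loop
def pvStepB (tagged : List (List (String × String)))
    (st : PySem.Dict String (List Int) × List Bool × List (List (String × String)))
    (wanted : String) :
    PySem.Dict String (List Int) × List Bool × List (List (String × String)) :=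
  match pvBest st.1 ((pvCOMPAT.get? wanted).getD [wanted]) with
  | none => st
  | some (i, r) =>
    (st.1.insert r ((st.1.getD r []).tail),           -- buckets[r].popleft()
     PySem.List.pySetD st.2.1 i true,                 -- used[i] = True; i is in range
     st.2.2 ++ (PySem.List.pyGet? tagged i).toList)   -- out.append(tagged[i]); i is in range

def reorder_by_rule_alt (tagged : List (List (String × String))) (thsl_order : List String) :
    List (List (String × String)) :=
  -- buckets.setdefault(item.get("role",""), deque()).append(i)
  let buckets0 : PySem.Dict String (List Int) :=
    (PySem.List.enumerate tagged 0).foldl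
      (fun b p => b.modify (pvRole p.2) [] (fun q => q ++ [p.1])) PySem.Dict.empty
  let st := thsl_order.foldl (pvStepB tagged)
    (buckets0, List.replicate tagged.length false, [])
  st.2.2 ++
    (PySem.List.enumerate tagged 0).foldl
      (fun acc p => if PySem.List.pyGetD st.2.1 p.1 false then acc else acc ++ [p.2]) []

-- ===== PRECONDITION & SPEC =====
def Spec_reorder_by_rule (tagged : List (List (String × String))) (thsl_order : List String) (out : List (List (String × String))) : Prop := out = reorder_by_rule_alt tagged thsl_order
instance (tagged : List (List (String × String))) (thsl_order : List String) (out : List (List (String × String))) : Decidable (Spec_reorder_by_rule tagged thsl_order out) := by unfold Spec_reorder_by_rule; infer_instance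

-- ===== CLAIM (what is proved, stated in full; the proofs are below) =====
def Claim_equal_reorder_by_rule : Prop := ∀ (tagged : List (List (String × String))) (thsl_order : List String), Dom_reorder_by_rule tagged thsl_order → Spec_reorder_by_rule tagged thsl_order (reorder_by_rule tagged thsl_order)

-- ===== LEMMAS AND PROOFS =====

def pvBkt (r : String) : Int → List (List (String × String)) → List Int
  | _, [] => []
  | i, it :: rest => if pvRole it = r then i :: pvBkt r (i + 1) rest else pvBkt r (i + 1) rest

def pvFc (u : Int → Bool) (p : String → Bool) : Int → List (List (String × String)) → Option (Int × String)
  | _, [] => none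
  | i, it :: rest =>
    if u i && p (pvRole it) then some (i, pvRole it) else pvFc u p (i + 1) rest

lemma pvBkt_bounds (r : String) : ∀ (l : List (List (String × String))) (i j : Int),
    j ∈ pvBkt r i l → i ≤ j ∧ j < i + l.length := by
  intro l
  induction l with
  | nil => intro i j h; simp [pvBkt] at h
  | cons it rest ih =>
    intro i j h
    simp only [pvBkt] at h
    split at h
    · rcases List.mem_cons.mp h with rfl | h
      · simp only [List.length_cons]; omega
      · have := ih (i+1) j h; simp only [List.length_cons] at this ⊢; omega
    · have := ih (i+1) j h; simp only [List.length_cons] at this ⊢; omega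

lemma pvBkt_pairwise (r : String) : ∀ (l : List (List (String × String))) (i : Int),
    (pvBkt r i l).Pairwise (· < ·) := by
  intro l
  induction l with
  | nil => intro i; simp [pvBkt]
  | cons it rest ih =>
    intro i
    simp only [pvBkt]
    split
    · exact List.Pairwise.cons (fun j hj => by have := pvBkt_bounds r rest (i+1) j hj; omega) (ih (i+1))
    · exact ih (i+1)

lemma pvBkt_disjoint (r r' : String) : ∀ (l : List (List (String × String))) (i j : Int),
    j ∈ pvBkt r i l → j ∈ pvBkt r' i l → r = r' := by
  intro l
  induction l with
  | nil => intro i j h; simp [pvBkt] at h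
  | cons it rest ih =>
    intro i j h h'
    simp only [pvBkt] at h h'
    by_cases h1 : pvRole it = r <;> by_cases h2 : pvRole it = r'
    · exact h1 ▸ h2
    · simp only [if_pos h1, if_neg h2] at h h'
      rcases List.mem_cons.mp h with rfl | h
      · exfalso; have := pvBkt_bounds r' rest (j+1) j h'; omega
      · exact ih (i+1) j h h'
    · simp only [if_neg h1, if_pos h2] at h h'
      rcases List.mem_cons.mp h' with rfl | h'
      · exfalso; have := pvBkt_bounds r rest (j+1) j h; omega
      · exact ih (i+1) j h h'
    · simp only [if_neg h1, if_neg h2] at h h'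
      exact ih (i+1) j h h'

def pvM2 (a b : Option (Int × String)) : Option (Int × String) :=
  match a, b with
  | none, b => b
  | some p, none => some p
  | some p, some q => if q.1 < p.1 then some q else some p

def pvFront (u : Int → Bool) (r : String) (i : Int) (l : List (List (String × String))) :
    Option (Int × String) :=
  (((pvBkt r i l).filter u).head?).map (fun x => (x, r))

def pvGt (i : Int) (o : Option (Int × String)) : Prop := ∀ v s, o = some (v, s) → i < v

lemma pvFc_front (u : Int → Bool) (p : String → Bool) :
    ∀ (l : List (List (String × String))) (i j : Int) (r : String),
    pvFc u p i l = some (j, r) →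
    p r = true ∧ u j = true ∧ ((pvBkt r i l).filter u).head? = some j ∧ i ≤ j := by
  intro l
  induction l with
  | nil => intro i j r h; simp [pvFc] at h
  | cons it rest ih =>
    intro i j r h
    simp only [pvFc] at h
    split at h
    · rename_i hc
      obtain ⟨rfl, rfl⟩ : i = j ∧ pvRole it = r := by
        constructor <;> [exact congrArg Prod.fst (Option.some.inj h);
                         exact congrArg Prod.snd (Option.some.inj h)]
      simp only [Bool.and_eq_true] at hc
      refine ⟨hc.2, hc.1, ?_, le_refl _⟩
      simp [pvBkt, hc.1]
    · rename_i hc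
      obtain ⟨hp, hu, hh, hij⟩ := ih (i+1) j r h
      refine ⟨hp, hu, ?_, by omega⟩
      simp only [pvBkt]
      split
      · rename_i hr
        -- role of it is r; cond false so u i false (else p r true contradicts)
        have hui : u i = false := by
          by_contra hne
          have : u i = true := by revert hne; cases u i <;> simp
          rw [hr] at hc
          simp [this, hp] at hc
        simp [hui, hh]
      · exact hh

lemma pvFc_congr (u u' : Int → Bool) (p p' : String → Bool)
    (hp : ∀ s, p s = p' s) :
    ∀ (l : List (List (String × String))) (i : Int),
    (∀ j, i ≤ j → u j = u' j) → pvFc u p i l = pvFc u' p' i l := by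
  intro l
  induction l with
  | nil => intro i _; simp [pvFc]
  | cons it rest ih =>
    intro i hu
    simp only [pvFc, hu i le_rfl, hp]
    split
    · rfl
    · exact ih (i+1) (fun j hj => hu j (by omega))

lemma pvM2_gt (i : Int) (a b : Option (Int × String)) (ha : pvGt i a) (hb : pvGt i b) :
    pvGt i (pvM2 a b) := by
  intro v s h
  cases a with
  | none => exact hb v s h
  | some pa =>
    cases b with
    | none => exact ha v s h
    | some pb =>
      simp only [pvM2] at h
      split at h
      · exact hb v s h
      · exact ha v s h

lemma pvM2_keep (i : Int) (s : String) (b : Option (Int × String)) (hb : pvGt i b) :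
    pvM2 (some (i, s)) b = some (i, s) := by
  cases b with
  | none => rfl
  | some pb =>
    have := hb pb.1 pb.2 rfl
    simp only [pvM2]
    rw [if_neg (by omega)]

lemma pvM2_take (i : Int) (s : String) (a : Option (Int × String)) (ha : pvGt i a) :
    pvM2 a (some (i, s)) = some (i, s) := by
  cases a with
  | none => rfl
  | some pa =>
    have := ha pa.1 pa.2 rfl
    simp only [pvM2]
    rw [if_pos (by omega)]

lemma pvFoldM2_gt (i : Int) (F : String → Option (Int × String)) :
    ∀ (rs : List String) (a : Option (Int × String)), pvGt i a →
    (∀ r ∈ rs, pvGt i (F r)) → pvGt i (rs.foldl (fun b r => pvM2 b (F r)) a) := by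
  intro rs
  induction rs with
  | nil => intro a ha _; exact ha
  | cons r rest ih =>
    intro a ha hF
    simp only [List.foldl_cons]
    exact ih _ (pvM2_gt i a (F r) ha (hF r (by simp))) (fun r' hr' => hF r' (by simp [hr']))

lemma pvFoldM2_keep (i : Int) (s : String) (F : String → Option (Int × String)) :
    ∀ (rs : List String), (∀ r ∈ rs, pvGt i (F r)) →
    rs.foldl (fun b r => pvM2 b (F r)) (some (i, s)) = some (i, s) := by
  intro rs
  induction rs with
  | nil => intro _; rfl
  | cons r rest ih =>
    intro hF
    simp only [List.foldl_cons]
    rw [pvM2_keep i s (F r) (hF r (by simp))]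
    exact ih (fun r' hr' => hF r' (by simp [hr']))

lemma pvFront_gt (u : Int → Bool) (r : String) (i : Int) (l : List (List (String × String)))
    (i' : Int) (h : i < i') : pvGt i (pvFront u r i' l) := by
  intro v s hv
  simp only [pvFront, Option.map_eq_some_iff] at hv
  obtain ⟨x, hx, hxe⟩ := hv
  have hx1 : x = v := congrArg Prod.fst hxe
  have hm : x ∈ (pvBkt r i' l).filter u := List.head?_eq_some_iff.mp hx |>.elim (fun t ht => ht ▸ List.mem_cons_self ..)
  have := pvBkt_bounds r l i' x (List.mem_of_mem_filter hm)
  omega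

lemma pvFindA_eq (used : PySem.Set Int) (w : String) :
    ∀ (l : List (List (String × String))) (i : Int),
    pvFindA used w i l =
      (match pvFc (fun j => decide (j ∉ used)) (fun s => pvCompat w s) i l with
       | none => -1
       | some q => q.1) := by
  intro l
  induction l with
  | nil => intro i; simp [pvFindA, pvFc]
  | cons it rest ih =>
    intro i
    simp only [pvFindA, pvFc]
    split
    · rfl
    · exact ih (i+1)

lemma pvFold_eq_fc (u : Int → Bool) (rs : List String) (hn : rs.Nodup) :
    ∀ (l : List (List (String × String))) (i : Int),
    rs.foldl (fun b r => pvM2 b (pvFront u r i l)) none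
      = pvFc u (fun s => rs.contains s) i l := by
  intro l
  induction l with
  | nil =>
    intro i
    have h0 : ∀ r, pvFront u r i ([] : List (List (String × String))) = none := by
      intro r; simp [pvFront, pvBkt]
    simp only [pvFc]
    induction rs with
    | nil => rfl
    | cons r rest ih => simp only [List.foldl_cons, h0, pvM2]; exact ih (List.Nodup.of_cons hn)
  | cons it rest ih =>
    intro i
    by_cases hcase : u i = true ∧ (pvRole it) ∈ rs
    · obtain ⟨hui, hmem⟩ := hcase
      obtain ⟨rs1, rs2, rfl⟩ := List.append_of_mem hmem
      have hnotin : pvRole it ∉ rs1 ∧ pvRole it ∉ rs2 := by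
        have := hn
        simp [List.nodup_append, List.nodup_cons] at this
        exact ⟨fun h => (this.2.2 _ h).1 rfl, this.2.1.1⟩
      -- fronts of roles ≠ role it are all > i
      have hfr : ∀ r, r ≠ pvRole it → pvGt i (pvFront u r i (it :: rest)) := by
        intro r hr
        have : pvFront u r i (it :: rest) = pvFront u r (i+1) rest := by
          simp only [pvFront, pvBkt]
          rw [if_neg (Ne.symm hr)]
        rw [this]
        exact pvFront_gt u r i rest (i+1) (by omega)
      have hfself : pvFront u (pvRole it) i (it :: rest) = some (i, pvRole it) := by
        simp [pvFront, pvBkt, hui]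
      rw [List.foldl_append]
      rw [List.foldl_cons]
      have h1 : pvGt i (rs1.foldl (fun b r => pvM2 b (pvFront u r i (it :: rest))) none) := by
        apply pvFoldM2_gt
        · intro v s h; cases h
        · intro r hr; exact hfr r (fun h => hnotin.1 (h ▸ hr))
      rw [hfself, pvM2_take _ _ _ h1]
      rw [pvFoldM2_keep _ _ _ rs2 (fun r hr => hfr r (fun h => hnotin.2 (h ▸ hr)))]
      simp only [pvFc, hui, Bool.true_and]
      rw [if_pos]
      simp [hmem]
    · -- either i is used or its role is not wanted: every front steps to i+1
      have hfr : ∀ r ∈ rs, pvFront u r i (it :: rest) = pvFront u r (i+1) rest := by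
        intro r hr
        by_cases hrole : pvRole it = r
        · subst hrole
          have hui : u i = false := by
            rcases Bool.eq_false_or_eq_true (u i) with h | h
            · exact absurd ⟨h, hr⟩ hcase
            · exact h
          simp [pvFront, pvBkt, hui]
        · simp only [pvFront, pvBkt]
          rw [if_neg hrole]
      have hcg := PySem.List.foldl_congr_mem (l := rs) (init := (none : Option (Int × String)))
        (f := fun b r => pvM2 b (pvFront u r i (it :: rest)))
        (g := fun b r => pvM2 b (pvFront u r (i+1) rest))
        (fun b r hr => by dsimp only; rw [hfr r hr])
      rw [hcg, ih (i+1)]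
      have hcond : (u i && (rs.contains (pvRole it))) = false := by
        by_cases h : u i = true
        · have hm : pvRole it ∉ rs := fun hm => hcase ⟨h, hm⟩
          simp [h, hm]
        · have h' : u i = false := by revert h; cases u i <;> simp
          simp [h']
      simp only [pvFc, hcond, Bool.false_eq_true, if_false]

lemma pvBest_eq (buckets : PySem.Dict String (List Int)) (u : Int → Bool)
    (l : List (List (String × String)))
    (hb : ∀ r, buckets.getD r [] = (pvBkt r 0 l).filter u) (rs : List String) :
    pvBest buckets rs = rs.foldl (fun b r => pvM2 b (pvFront u r 0 l)) none := by
  unfold pvBest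
  apply PySem.List.foldl_congr_mem
  intro best r _
  dsimp only
  have hg : buckets.getD r [] = (buckets.get? r).getD [] := PySem.Dict.getD_eq_get?_getD ..
  cases hq : buckets.get? r with
  | none =>
    have : (pvBkt r 0 l).filter u = [] := by rw [← hb r, hg, hq]; rfl
    simp [pvFront, this, pvM2]
    cases best <;> rfl
  | some q =>
    have hfq : (pvBkt r 0 l).filter u = q := by rw [← hb r, hg, hq]; rfl
    cases q with
    | nil =>
      simp [pvFront, hfq, pvM2]
      cases best <;> rfl
    | cons x xs =>
      have : pvFront u r 0 l = some (x, r) := by simp [pvFront, hfq]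
      rw [this]
      cases best with
      | none => rfl
      | some b => simp [pvM2]

lemma pvRoles_spec (w : String) :
    ((pvCOMPAT.get? w).getD [w]).Nodup ∧
    (∀ s, ((pvCOMPAT.get? w).getD [w]).contains s = pvCompat w s) := by
  by_cases h1 : w = "Age/Year"
  · subst h1
    have e : (pvCOMPAT.get? "Age/Year").getD ["Age/Year"] = ["Age", "Year"] := by decide
    rw [e]
    exact ⟨by decide, fun s => by simp [pvCompat]⟩
  · by_cases h2 : w = "S"
    · subst h2
      have e : (pvCOMPAT.get? "S").getD ["S"] = ["S", "Pronoun"] := by decide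
      rw [e]
      exact ⟨by decide, fun s => by simp [pvCompat]⟩
    · by_cases h3 : w = "Adj"
      · subst h3
        have e : (pvCOMPAT.get? "Adj").getD ["Adj"] = ["Adj", "Adj1", "Adj2"] := by decide
        rw [e]
        exact ⟨by decide, fun s => by simp [pvCompat]⟩
      · have hk : pvCOMPAT.keys = ["Age/Year", "S", "Adj"] := by decide
        have hc : pvCOMPAT.contains w = false := by
          rcases Bool.eq_false_or_eq_true (pvCOMPAT.contains w) with h | h
          · exfalso
            have := (PySem.Dict.contains_iff_mem_keys pvCOMPAT w).mp h
            rw [hk] at this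
            simp [h1, h2, h3] at this
          · exact h
        have e : pvCOMPAT.get? w = none :=
          (PySem.Dict.get?_eq_none_iff_contains pvCOMPAT w).mpr hc
        rw [e]
        refine ⟨by simp, fun s => ?_⟩
        simp only [pvCompat, if_neg h1, if_neg h2, if_neg h3]
        simp [eq_comm]

lemma pvBuckets_build (r : String) :
    ∀ (l : List (List (String × String))) (i : Int) (acc : PySem.Dict String (List Int)),
    ((PySem.List.enumerate l i).foldl
        (fun b p => b.modify (pvRole p.2) [] (fun q => q ++ [p.1])) acc).getD r []
      = acc.getD r [] ++ pvBkt r i l := by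
  intro l
  induction l with
  | nil => intro i acc; simp [PySem.List.enumerate, pvBkt]
  | cons it rest ih =>
    intro i acc
    rw [PySem.List.enumerate_cons, List.foldl_cons]
    rw [ih (i+1)]
    by_cases hr : pvRole it = r
    · subst hr
      rw [PySem.Dict.getD_modify_self]
      simp [pvBkt]
    · rw [PySem.Dict.getD_modify_of_ne _ _ _ (fun h => hr h.symm)]
      simp only [pvBkt]
      rw [if_neg hr]

lemma pvGetD_replicate (n : ℕ) (j : Int) (h : 0 ≤ j) :
    PySem.List.pyGetD (List.replicate n false) j false = false := by
  rw [← Int.toNat_of_nonneg h, PySem.List.pyGetD_natCast]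
  simp [List.getD]

lemma pvFilter_mark (u : Int → Bool) (a : Int) :
    ∀ (l : List Int), l.Pairwise (· < ·) → (l.filter u).head? = some a →
    l.filter (fun j => if j = a then false else u j) = (l.filter u).tail := by
  intro l hp hh
  have hndl : l.Nodup := hp.imp (fun h => ne_of_lt h)
  have hnd : (l.filter u).Nodup := hndl.filter _
  obtain ⟨t, ht⟩ : ∃ t, l.filter u = a :: t := by
    cases hft : l.filter u with
    | nil => rw [hft] at hh; simp at hh
    | cons x xs => rw [hft] at hh; simp at hh; exact ⟨xs, by rw [hh]⟩
  have hfilter : l.filter (fun j => if j = a then false else u j)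
      = (l.filter u).filter (fun j => !(j = a : Bool)) := by
    rw [List.filter_filter]
    apply List.filter_congr
    intro x _
    by_cases hx : x = a <;> simp [hx]
  rw [hfilter, ht]
  have hanot : a ∉ t := by rw [ht] at hnd; exact (List.nodup_cons.mp hnd).1
  simp only [List.filter_cons]
  rw [if_neg (by simp)]
  simp only [List.tail_cons]
  apply List.filter_eq_self.mpr
  intro x hx
  simp
  exact fun hxa => hanot (hxa ▸ hx)

lemma pvFilter_mark_other (u : Int → Bool) (a : Int) (l : List Int) (ha : a ∉ l) :
    l.filter (fun j => if j = a then false else u j) = l.filter u := by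
  apply List.filter_congr
  intro x hx
  rw [if_neg (show ¬ x = a from fun h => ha (by rwa [← h]))]

def pvU (usedB : List Bool) : Int → Bool := fun j => !(PySem.List.pyGetD usedB j false)

def pvInv (tagged : List (List (String × String))) (usedA : PySem.Set Int)
    (buckets : PySem.Dict String (List Int)) (usedB : List Bool) : Prop :=
  usedB.length = tagged.length ∧
  (∀ r, buckets.getD r [] = (pvBkt r 0 tagged).filter (pvU usedB)) ∧
  (∀ j : Int, 0 ≤ j → decide (j ∈ usedA) = PySem.List.pyGetD usedB j false)

lemma pvStep_preserve (tagged : List (List (String × String))) (w : String)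
    (usedA : PySem.Set Int) (buckets : PySem.Dict String (List Int)) (usedB : List Bool)
    (outA outB : List (List (String × String)))
    (hinv : pvInv tagged usedA buckets usedB) (hout : outA = outB) :
    pvInv tagged (pvStepA tagged (usedA, outA) w).1 (pvStepB tagged (buckets, usedB, outB) w).1
        (pvStepB tagged (buckets, usedB, outB) w).2.1 ∧
    (pvStepA tagged (usedA, outA) w).2 = (pvStepB tagged (buckets, usedB, outB) w).2.2 := by
  obtain ⟨hlen, hbk, hus⟩ := hinv
  have hroles := pvRoles_spec w
  have hfc : pvFc (fun j => decide (j ∉ usedA)) (fun s => pvCompat w s) 0 tagged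
      = pvFc (pvU usedB) (fun s => ((pvCOMPAT.get? w).getD [w]).contains s) 0 tagged := by
    apply pvFc_congr
    · intro s; exact (hroles.2 s).symm
    · intro j hj
      simp only [pvU, decide_not]
      rw [hus j hj]
  have hbest : pvBest buckets ((pvCOMPAT.get? w).getD [w])
      = pvFc (pvU usedB) (fun s => ((pvCOMPAT.get? w).getD [w]).contains s) 0 tagged := by
    rw [pvBest_eq buckets (pvU usedB) tagged hbk]
    exact pvFold_eq_fc (pvU usedB) _ hroles.1 tagged 0
  simp only [pvStepA, pvStepB, pvFindA_eq, hfc, hbest]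
  cases hres : pvFc (pvU usedB) (fun s => ((pvCOMPAT.get? w).getD [w]).contains s) 0 tagged with
  | none =>
    simp only []
    rw [if_neg (by norm_num)]
    exact ⟨⟨hlen, hbk, hus⟩, hout⟩
  | some q =>
    obtain ⟨i0, r0⟩ := q
    obtain ⟨hp0, hu0, hh0, h0i⟩ := pvFc_front _ _ tagged 0 i0 r0 hres
    have hi0mem : i0 ∈ pvBkt r0 0 tagged := by
      have : i0 ∈ (pvBkt r0 0 tagged).filter (pvU usedB) :=
        List.head?_eq_some_iff.mp hh0 |>.elim (fun t ht => ht ▸ List.mem_cons_self ..)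
      exact List.mem_of_mem_filter this
    have hibound := pvBkt_bounds r0 tagged 0 i0 hi0mem
    have hi0n : ((i0.toNat : ℕ) : ℤ) = i0 := Int.toNat_of_nonneg h0i
    have hltB : i0.toNat < usedB.length := by rw [hlen]; omega
    have hgd : ∀ j : Int, 0 ≤ j → PySem.List.pyGetD (PySem.List.pySetD usedB i0 true) j false
        = if j = i0 then true else PySem.List.pyGetD usedB j false := by
      intro j hj
      have hjn : ((j.toNat : ℕ) : ℤ) = j := Int.toNat_of_nonneg hj
      conv_lhs => rw [← hi0n, ← hjn]
      rw [PySem.List.pyGetD_pySetD_natCast usedB i0.toNat j.toNat _ _ hltB]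
      rw [hjn]
      by_cases hji : j = i0
      · rw [if_pos hji, if_pos (by omega)]
      · rw [if_neg (show ¬ j.toNat = i0.toNat by omega), if_neg hji]
    simp only []
    rw [if_pos h0i]
    refine ⟨⟨?_, ?_, ?_⟩, by rw [hout]⟩
    · rw [← hi0n, PySem.List.pySetD_natCast, List.length_set, hlen]
    · intro r
      rw [PySem.Dict.getD_insert]
      have hfeq : (pvBkt r 0 tagged).filter (pvU (PySem.List.pySetD usedB i0 true))
          = (pvBkt r 0 tagged).filter (fun j => if j = i0 then false else pvU usedB j) := by
        apply List.filter_congr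
        intro x hx
        have hx0 : 0 ≤ x := (pvBkt_bounds r tagged 0 x hx).1
        simp only [pvU, hgd x hx0]
        by_cases hxi : x = i0 <;> simp [hxi]
      rw [hfeq]
      by_cases hr : r = r0
      · rw [if_pos hr, hbk r0, hr]
        exact (pvFilter_mark (pvU usedB) i0 (pvBkt r0 0 tagged)
          (pvBkt_pairwise r0 tagged 0) hh0).symm
      · rw [if_neg hr, hbk r]
        refine (pvFilter_mark_other (pvU usedB) i0 (pvBkt r 0 tagged) ?_).symm
        intro hmem
        exact hr (pvBkt_disjoint r r0 tagged 0 i0 hmem hi0mem)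
    · intro j hj
      rw [hgd j hj]
      by_cases hji : j = i0
      · subst hji
        simp [PySem.Set.mem_add]
      · rw [if_neg hji, ← hus j hj]
        simp [PySem.Set.mem_add, hji]

lemma pvOuter (tagged : List (List (String × String))) :
    ∀ (ws : List String) (usedA : PySem.Set Int) (buckets : PySem.Dict String (List Int))
      (usedB : List Bool) (outA outB : List (List (String × String))),
    pvInv tagged usedA buckets usedB → outA = outB →
    pvInv tagged (ws.foldl (pvStepA tagged) (usedA, outA)).1
        (ws.foldl (pvStepB tagged) (buckets, usedB, outB)).1
        (ws.foldl (pvStepB tagged) (buckets, usedB, outB)).2.1 ∧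
    (ws.foldl (pvStepA tagged) (usedA, outA)).2
      = (ws.foldl (pvStepB tagged) (buckets, usedB, outB)).2.2 := by
  intro ws
  induction ws with
  | nil => intro uA bk uB oA oB hinv hout; exact ⟨hinv, hout⟩
  | cons w rest ih =>
    intro uA bk uB oA oB hinv hout
    simp only [List.foldl_cons]
    obtain ⟨hinv', hout'⟩ := pvStep_preserve tagged w uA bk uB oA oB hinv hout
    exact ih _ _ _ _ _ hinv' hout'

lemma pvMain (tagged : List (List (String × String))) (thsl_order : List String) :
    reorder_by_rule tagged thsl_order = reorder_by_rule_alt tagged thsl_order := by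
  unfold reorder_by_rule reorder_by_rule_alt
  dsimp only
  have hinv0 : pvInv tagged PySem.Set.empty
      ((PySem.List.enumerate tagged 0).foldl
        (fun b p => b.modify (pvRole p.2) [] (fun q => q ++ [p.1])) PySem.Dict.empty)
      (List.replicate tagged.length false) := by
    refine ⟨by simp, ?_, ?_⟩
    · intro r
      rw [pvBuckets_build r tagged 0 PySem.Dict.empty]
      have hempty : (PySem.Dict.empty : PySem.Dict String (List Int)).getD r [] = [] := rfl
      rw [hempty, List.nil_append]
      refine (List.filter_eq_self.mpr ?_).symm
      intro j hj
      have h0 := (pvBkt_bounds r tagged 0 j hj).1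
      simp [pvU, pvGetD_replicate tagged.length j h0]
    · intro j hj
      rw [pvGetD_replicate tagged.length j hj]
      simp [PySem.Set.empty]
  obtain ⟨hinvF, houtF⟩ := pvOuter tagged thsl_order PySem.Set.empty _
    (List.replicate tagged.length false) [] [] hinv0 rfl
  obtain ⟨hlenF, hbkF, husF⟩ := hinvF
  -- align the leftover passes
  set fA := thsl_order.foldl (pvStepA tagged) (PySem.Set.empty, []) with hfA
  set fB := thsl_order.foldl (pvStepB tagged)
    ((PySem.List.enumerate tagged 0).foldl
        (fun b p => b.modify (pvRole p.2) [] (fun q => q ++ [p.1])) PySem.Dict.empty,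
      List.replicate tagged.length false, []) with hfB
  have hcondeq : ∀ (p : Int × List (String × String)), p ∈ PySem.List.enumerate tagged 0 →
      ∀ (out : List (List (String × String))),
      (if decide (p.1 ∉ fA.1) then out ++ [p.2] else out)
        = (if PySem.List.pyGetD fB.2.1 p.1 false then out else out ++ [p.2]) := by
    intro p hp out
    have hp0 : 0 ≤ p.1 := by
      obtain ⟨k, hk, hpe⟩ := (PySem.List.mem_enumerate_iff ..).mp hp
      rw [hpe]; simp
    have := husF p.1 hp0
    rw [← this]
    by_cases hmem : p.1 ∈ fA.1 <;> simp [hmem]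
  have hL : (PySem.List.enumerate tagged 0).foldl
      (fun out p => if decide (p.1 ∉ fA.1) then out ++ [p.2] else out) fA.2
      = (PySem.List.enumerate tagged 0).foldl
        (fun out p => if PySem.List.pyGetD fB.2.1 p.1 false then out else out ++ [p.2]) fA.2 :=
    PySem.List.foldl_congr_mem _ _ _ _ (fun out p hp => hcondeq p hp out)
  rw [hL, houtF]
  -- both are 'append the kept items'
  have hshape : ∀ (acc : List (List (String × String))),
      (PySem.List.enumerate tagged 0).foldl
        (fun out p => if PySem.List.pyGetD fB.2.1 p.1 false then out else out ++ [p.2]) acc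
      = acc ++ ((PySem.List.enumerate tagged 0).filter
          (fun p => !(PySem.List.pyGetD fB.2.1 p.1 false))).map (·.2) := by
    intro acc
    rw [PySem.List.foldl_congr_mem _ _ (fun out p =>
      if !(PySem.List.pyGetD fB.2.1 p.1 false) then out ++ [p.2] else out) acc
      (fun out p _ => by cases hc : PySem.List.pyGetD fB.2.1 p.1 false <;> simp [hc])]
    exact PySem.List.foldl_append_if _ _ _ _
  rw [hshape, hshape]
  simp

-- ===== VERDICT (by name: the statement is the Claim_ definition above) =====
theorem reorder_by_rule_spec : Claim_equal_reorder_by_rule := by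
  intro tagged thsl_order _
  unfold Spec_reorder_by_rule
  exact pvMain tagged thsl_order
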